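-- pv_equiv track=rewrite | github.com/vladimir-vladykin/goit-algo-fp | optimal_food_choice.py | pop_best_available_item
-- ===== SOURCE A (Python) =====
-- def pop_best_available_item(budget_left, items: dict):
--     if not items:
--         return None
--
--     max_item = None
--     for item in items.items():
--         _, item_details = item
--         if item_details["cost"] > budget_left:
--             # we can't afford this item
--             continue
--
--         if not max_item or (max_item and item_details["calories"] > max_item[1]["calories"]):
--             max_item = item
--
--     if (max_item is None):
--         # seems like we're out of budget
--         return None
--
--     items.pop(max_item[0])
--     return max_item
-- ===== SOURCE B (Python) =====
-- def pop_best_available_item(budget_left, items: dict):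
--     # Sort items by calories, highest first (stable: dict order kept among ties),
--     # then take the first one we can afford.
--     ranked = sorted(items.items(), key=lambda kv: kv[1]["calories"], reverse=True)
--     for key, details in ranked:
--         if details["cost"] <= budget_left:
--             items.pop(key)
--             return (key, details)
--     return None
-- ===== Notes on version B (the rewrite author's own statement) =====
-- stated objective: alternative
-- what changed: Replaces the single-pass running-max loop by sort-calories-descending (stable) then return the first affordable item.
-- outside the precondition, e.g. on pop_best_available_item(10, {'a': {'cost': 100}}): A returns None, B raises KeyError
import Mathlib
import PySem

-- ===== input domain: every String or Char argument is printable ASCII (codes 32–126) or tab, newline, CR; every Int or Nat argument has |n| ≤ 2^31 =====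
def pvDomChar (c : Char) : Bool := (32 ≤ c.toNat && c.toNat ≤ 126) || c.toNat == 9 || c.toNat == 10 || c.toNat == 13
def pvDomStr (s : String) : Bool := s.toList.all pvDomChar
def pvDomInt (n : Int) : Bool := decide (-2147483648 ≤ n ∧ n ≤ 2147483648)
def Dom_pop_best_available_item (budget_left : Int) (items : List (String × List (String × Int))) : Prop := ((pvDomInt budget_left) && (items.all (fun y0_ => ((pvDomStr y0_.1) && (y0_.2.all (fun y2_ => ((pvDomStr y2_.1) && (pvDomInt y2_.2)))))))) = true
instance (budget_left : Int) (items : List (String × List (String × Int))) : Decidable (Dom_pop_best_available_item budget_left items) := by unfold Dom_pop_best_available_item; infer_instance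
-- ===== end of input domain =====

-- B replaces A's running-max loop by a stable descending sort on calories followed by a scan for the
-- first affordable item (objective: alternative). Both Pythons pop the chosen key from `items`; the
-- equivalence proved here is about the RETURN value only (B performs the same mutation as A).

-- ===== PORT A =====
-- d["cost"] / d["calories"] on the inner dict = first-match association lookup; the `.getD 0`
-- default is only reached where Python raises KeyError, which Pre_ excludes.
def pvCost (kv : String × List (String × Int)) : Int := (kv.2.lookup "cost").getD 0
def pvCal (kv : String × List (String × Int)) : Int := (kv.2.lookup "calories").getD 0

-- the body of A's `for item in items.items()` loop, updating `max_item`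
def pvStep (budget_left : Int) (max_item : Option (String × (List (String × Int))))
    (item : String × (List (String × Int))) : Option (String × (List (String × Int))) :=
  if pvCost item > budget_left then max_item       -- we can't afford this item
  else
    match max_item with
    | none => some item
    | some m => if pvCal item > pvCal m then some item else max_item

def pop_best_available_item (budget_left : Int) (items : List (String × List (String × Int))) : Option (String × (List (String × Int))) :=
  if items = [] then none
  else
    -- A's final `if max_item is None: return None / return max_item` is returning the loop's result;
    -- `items.pop(max_item[0])` does not affect the return value.
    items.foldl (pvStep budget_left) none

-- ===== PORT B =====
def pop_best_available_item_alt (budget_left : Int) (items : List (String × List (String × Int))) : Option (String × (List (String × Int))) :=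
  (PySem.List.sorted items pvCal true).find? (fun kv => decide (pvCost kv ≤ budget_left))

-- ===== PRECONDITION & SPEC =====
-- Pre_ excludes items whose details dict lacks the "cost" or "calories" key: there Python A raises
-- KeyError (or returns only because an unaffordable/never-compared item's missing "calories" was
-- accidentally never read, in which case B's sort raises KeyError).
def Pre_pop_best_available_item (budget_left : Int) (items : List (String × List (String × Int))) : Prop :=
  ∀ kv ∈ items, (kv.2.lookup "cost").isSome = true ∧ (kv.2.lookup "calories").isSome = true
instance (budget_left : Int) (items : List (String × List (String × Int))) : Decidable (Pre_pop_best_available_item budget_left items) := by unfold Pre_pop_best_available_item; infer_instance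
def pvWitness_pop_best_available_item : Int × (List (String × List (String × Int))) :=
  (10, [("apple", [("cost", 3), ("calories", 50)]), ("cake", [("cost", 15), ("calories", 300)])])

def Spec_pop_best_available_item (budget_left : Int) (items : List (String × List (String × Int))) (out : Option (String × (List (String × Int)))) : Prop := out = pop_best_available_item_alt budget_left items
instance (budget_left : Int) (items : List (String × List (String × Int))) (out : Option (String × (List (String × Int)))) : Decidable (Spec_pop_best_available_item budget_left items out) := by unfold Spec_pop_best_available_item; infer_instance

-- ===== CLAIM (what is proved, stated in full; the proofs are below) =====
def Claim_equal_pop_best_available_item : Prop := ∀ (budget_left : Int) (items : List (String × List (String × Int))), Dom_pop_best_available_item budget_left items → Pre_pop_best_available_item budget_left items → Spec_pop_best_available_item budget_left items (pop_best_available_item budget_left items)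

-- ===== LEMMAS AND PROOFS =====

-- Inserting x into a calories-descending list S commutes with "first affordable" exactly as A's
-- loop body pvStep updates the running max.
theorem pv_find_insertBy (b : Int) (x : String × (List (String × Int)))
    (S : List (String × List (String × Int)))
    (hS : S.Pairwise (fun a c => pvCal c ≤ pvCal a)) :
    (PySem.List.insertBy (fun a c => decide (pvCal c < pvCal a)) x S).find?
        (fun kv => decide (pvCost kv ≤ b))
      = pvStep b (S.find? (fun kv => decide (pvCost kv ≤ b))) x := by
  induction S with
  | nil =>
    by_cases hx : pvCost x ≤ b <;>
      simp [PySem.List.insertBy, pvStep, List.find?, hx]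
  | cons y t ih =>
    rcases List.pairwise_cons.mp hS with ⟨hy, ht⟩
    by_cases h1 : pvCal y < pvCal x
    · -- x goes in front of y
      simp only [PySem.List.insertBy, h1, decide_true, if_true]
      by_cases hx : pvCost x ≤ b
      · -- x itself is the first affordable element
        have hnx : ¬ pvCost x > b := by omega
        cases hf : (y :: t).find? (fun kv => decide (pvCost kv ≤ b)) with
        | none => simp [List.find?, pvStep, hx, hnx]
        | some m =>
          have hm : m ∈ y :: t := List.mem_of_find?_eq_some hf
          have hcal : pvCal m ≤ pvCal y := by
            rcases List.mem_cons.mp hm with rfl | hm'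
            · exact le_refl _
            · exact hy m hm'
          simp [List.find?, pvStep, hx, hnx, (by omega : pvCal x > pvCal m)]
      · simp [List.find?, pvStep, hx, (by omega : pvCost x > b)]
    · -- x goes somewhere after y
      simp only [PySem.List.insertBy, h1, decide_false, Bool.false_eq_true, if_false]
      by_cases hy' : pvCost y ≤ b
      · -- y is still the first affordable element, and A keeps m = y (pvCal x ≤ pvCal y)
        have hxy : ¬ pvCal x > pvCal y := by have := not_lt.mp h1; omega
        simp [List.find?, pvStep, hy', hxy]
      · simp [List.find?, hy', ih ht]

-- A's fold over the original list computes B's "first affordable in the calories-descending sort".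
theorem pv_fold_eq_find_sorted (b : Int) (l : List (String × List (String × Int))) :
    l.foldl (pvStep b) none
      = (PySem.List.sorted l pvCal true).find? (fun kv => decide (pvCost kv ≤ b)) := by
  induction l using List.reverseRecOn with
  | nil => rfl
  | append_singleton l x ih =>
    have hs : PySem.List.sorted (l ++ [x]) pvCal true
        = PySem.List.insertBy (fun a c => decide (pvCal c < pvCal a)) x
            (PySem.List.sorted l pvCal true) := by
      rw [PySem.List.sorted_rev_eq_foldl_insertBy, PySem.List.sorted_rev_eq_foldl_insertBy,
        List.foldl_append]
      rfl
    rw [List.foldl_append, hs,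
      pv_find_insertBy b x _ (PySem.List.sorted_pairwise_rev l pvCal), ih]
    rfl

-- ===== VERDICT (by name: the statement is the Claim_ definition above) =====
theorem pop_best_available_item_spec : Claim_equal_pop_best_available_item := by
  intro budget_left items _ _
  unfold Spec_pop_best_available_item pop_best_available_item pop_best_available_item_alt
  rcases eq_or_ne items [] with h | h
  · subst h; rfl
  · simp only [h, if_false]
    exact pv_fold_eq_find_sorted budget_left items
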